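-- pv_equiv track=rewrite | github.com/pandey-ankur-au17/Python | coding-challenges/week08/Test_1/ccq1.py | Max_occurence
-- ===== SOURCE A (Python) =====
-- def Max_occurence(a, n):
--     left = dict()
--
--     count = dict()
--     max1 = 0
--
--     min1, start = 0, 0
--
--     for i in range(n):
--         list1 = a[i]
--         if (list1 not in count.keys()):
--             left[list1] = i
--             count[list1] = 1
--         else:
--             count[list1] += 1
--
--         if (count[list1] > max1):
--             max1 = count[list1]
--             min1 = i - left[list1] + 1
--             start = left[list1]
--
--         elif (count[list1] == max1 and
--             i - left[list1] + 1 < min1):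
--             min1 = i - left[list1] + 1
--             start = left[list1]
--     ans = 0
--     for i in range(start, start + min1):
--         ans += 1
--     return ans
-- ===== SOURCE B (Python) =====
-- def Max_occurence(a, n):
--     count = {}
--     first = {}
--     last = {}
--     for i in range(n):
--         x = a[i]
--         if x not in count:
--             count[x] = 1
--             first[x] = i
--         else:
--             count[x] += 1
--         last[x] = i
--     best_count = 0
--     best_span = 0
--     for x, c in count.items():
--         span = last[x] - first[x] + 1
--         if c > best_count or (c == best_count and span < best_span):
--             best_count, best_span = c, span
--     return best_span
-- ===== Notes on version B (the rewrite author's own statement) =====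
-- stated objective: alternative
-- what changed: A tracks the best (frequency, span) pair online inside the indexing loop; B instead builds full count/first/last tables in one pass and then selects the max-frequency, min-span element in a separate scan over the table entries.
import Mathlib
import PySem

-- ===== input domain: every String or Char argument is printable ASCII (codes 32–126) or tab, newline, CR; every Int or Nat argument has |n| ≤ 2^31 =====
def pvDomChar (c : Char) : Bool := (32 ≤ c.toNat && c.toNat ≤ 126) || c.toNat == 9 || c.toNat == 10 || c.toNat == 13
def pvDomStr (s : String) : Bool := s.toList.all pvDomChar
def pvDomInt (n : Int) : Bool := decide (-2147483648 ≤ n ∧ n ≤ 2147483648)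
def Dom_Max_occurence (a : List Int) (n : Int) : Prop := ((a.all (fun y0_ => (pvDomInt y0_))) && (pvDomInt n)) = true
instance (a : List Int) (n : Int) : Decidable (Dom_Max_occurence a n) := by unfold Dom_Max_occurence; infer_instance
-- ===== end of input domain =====

-- B replaces A's online best-(frequency,span) tracking with count/first/last tables built in one
-- pass followed by a separate selection scan over the table entries (alternative decomposition).


-- ===== PORT A =====
-- loop body of A's 'for i in range(n)': state (left, count, max1, min1, start)
def stepA (a : List Int) (s : PySem.Dict Int Int × PySem.Dict Int Int × Int × Int × Int) (i : Int) :
    PySem.Dict Int Int × PySem.Dict Int Int × Int × Int × Int :=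
  match s with
  | (left, count, max1, min1, start) =>
    let list1 := PySem.List.pyGetD a i 0   -- a[i]; IndexError excluded by Pre_Max_occurence
    let p := if count.contains list1 = false
             then (left.insert list1 i, count.insert list1 1)
             else (left, count.insert list1 (count.getD list1 0 + 1))
    let left := p.1
    let count := p.2
    let cnt := count.getD list1 0
    let lf := left.getD list1 0
    if cnt > max1 then (left, count, cnt, i - lf + 1, lf)
    else if cnt = max1 ∧ i - lf + 1 < min1 then (left, count, max1, i - lf + 1, lf)
    else (left, count, max1, min1, start)

def Max_occurence (a : List Int) (n : Int) : Int :=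
  match (PySem.List.pyRange 0 n 1).foldl (stepA a) (PySem.Dict.empty, PySem.Dict.empty, 0, 0, 0) with
  | (_, _, _, min1, start) =>
    (PySem.List.pyRange start (start + min1) 1).foldl (fun ans _ => ans + 1) 0

-- ===== PORT B =====
-- first pass of B: build (count, first, last)
def stepB (a : List Int) (s : PySem.Dict Int Int × PySem.Dict Int Int × PySem.Dict Int Int) (i : Int) :
    PySem.Dict Int Int × PySem.Dict Int Int × PySem.Dict Int Int :=
  match s with
  | (count, first, last) =>
    let x := PySem.List.pyGetD a i 0   -- a[i]; IndexError excluded by Pre_Max_occurence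
    let q := if count.contains x = false
             then (count.insert x 1, first.insert x i)
             else (count.insert x (count.getD x 0 + 1), first)
    (q.1, q.2, last.insert x i)

-- second pass of B: one step of the scan over count.items()
def scanStep (first last : PySem.Dict Int Int) (b : Int × Int) (p : Int × Int) : Int × Int :=
  let span := last.getD p.1 0 - first.getD p.1 0 + 1
  if p.2 > b.1 ∨ (p.2 = b.1 ∧ span < b.2) then (p.2, span) else b

def Max_occurence_alt (a : List Int) (n : Int) : Int :=
  match (PySem.List.pyRange 0 n 1).foldl (stepB a) (PySem.Dict.empty, PySem.Dict.empty, PySem.Dict.empty) with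
  | (count, first, last) => (count.items.foldl (scanStep first last) (0, 0)).2

-- ===== PRECONDITION & SPEC =====
-- Pre_ excludes exactly the inputs where Python A raises IndexError (a[i] with n > len(a)).
def Pre_Max_occurence (a : List Int) (n : Int) : Prop := n ≤ (a.length : Int)
instance (a : List Int) (n : Int) : Decidable (Pre_Max_occurence a n) := by unfold Pre_Max_occurence; infer_instance
def pvWitness_Max_occurence : List Int × Int := ([1, 2, 1, 3], 4)

def Spec_Max_occurence (a : List Int) (n : Int) (out : Int) : Prop := out = Max_occurence_alt a n
instance (a : List Int) (n : Int) (out : Int) : Decidable (Spec_Max_occurence a n out) := by unfold Spec_Max_occurence; infer_instance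

-- ===== CLAIM (what is proved, stated in full; the proofs are below) =====
def Claim_equal_Max_occurence : Prop := ∀ (a : List Int) (n : Int), Dom_Max_occurence a n → Pre_Max_occurence a n → Spec_Max_occurence a n (Max_occurence a n)

-- ===== LEMMAS AND PROOFS =====

-- 'pvUpd b p': keep the better of the two (count, span) pairs — A's branch pair and B's scan step
-- are both instances of it.
def pvUpd (b p : Int × Int) : Int × Int :=
  if p.1 > b.1 ∨ (p.1 = b.1 ∧ p.2 < b.2) then p else b

def pvQ (T : List (Int × Int)) : Int × Int := T.foldl pvUpd (0, 0)

def pvSpan (first last : PySem.Dict Int Int) (p : Int × Int) : Int × Int :=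
  (p.2, last.getD p.1 0 - first.getD p.1 0 + 1)

lemma pvUpd_comm (x p q : Int × Int) : pvUpd (pvUpd x p) q = pvUpd (pvUpd x q) p := by
  obtain ⟨a, b⟩ := x; obtain ⟨c, d⟩ := p; obtain ⟨e, f⟩ := q
  simp only [pvUpd]
  split_ifs <;> simp_all [Prod.mk.injEq] <;> omega

lemma pvUpd_absorb (x p q : Int × Int) (h : q.1 < p.1) : pvUpd (pvUpd x q) p = pvUpd x p := by
  obtain ⟨a, b⟩ := x; obtain ⟨c, d⟩ := p; obtain ⟨e, f⟩ := q
  simp only [pvUpd]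
  split_ifs <;> simp_all [Prod.mk.injEq] <;> omega

lemma foldl_pvUpd_out (Y : List (Int × Int)) (x p : Int × Int) :
    Y.foldl pvUpd (pvUpd x p) = pvUpd (Y.foldl pvUpd x) p := by
  induction Y generalizing x with
  | nil => rfl
  | cons q Y ih => simp only [List.foldl_cons, pvUpd_comm x p q, ih]

-- replacing one entry (c, s) by (c+1, s') anywhere in the list acts like one more pvUpd step
lemma pvQ_replace (X Y : List (Int × Int)) (c s s' : Int) :
    pvQ (X ++ (c + 1, s') :: Y) = pvUpd (pvQ (X ++ (c, s) :: Y)) (c + 1, s') := by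
  simp only [pvQ, List.foldl_append, List.foldl_cons]
  rw [foldl_pvUpd_out, foldl_pvUpd_out Y _ (c, s), pvUpd_absorb _ _ _ (by omega)]

-- A's if/elif/else over (max1, min1) is exactly pvUpd
lemma stepPair (max1 min1 c s : Int) :
    (if c > max1 then (c, s) else if c = max1 ∧ s < min1 then (max1, s) else (max1, min1))
      = pvUpd (max1, min1) (c, s) := by
  simp only [pvUpd]
  split_ifs <;> simp_all [Prod.mk.injEq] <;> omega

-- the invariant tying A's loop state to B's three tables after the same number of steps
def pvRel (sA : PySem.Dict Int Int × PySem.Dict Int Int × Int × Int × Int)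
    (sB : PySem.Dict Int Int × PySem.Dict Int Int × PySem.Dict Int Int) (m : Int) : Prop :=
  sA.1 = sB.2.1 ∧ sA.2.1 = sB.1 ∧
  (sA.2.2.1, sA.2.2.2.1) = pvQ (sB.1.items.map (pvSpan sB.2.1 sB.2.2)) ∧
  sB.1.keys.Nodup ∧ 0 ≤ sA.2.2.2.1 ∧
  (∀ x : Int, sB.1.contains x = true → sB.2.1.getD x 0 < m)

lemma pvRel_step (a : List Int) (sA : PySem.Dict Int Int × PySem.Dict Int Int × Int × Int × Int)
    (sB : PySem.Dict Int Int × PySem.Dict Int Int × PySem.Dict Int Int) (m : Int)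
    (h : pvRel sA sB m) : pvRel (stepA a sA m) (stepB a sB m) (m + 1) := by
  obtain ⟨left, count, max1, min1, start⟩ := sA
  obtain ⟨countB, first, last⟩ := sB
  obtain ⟨h1, h2, h3, h4, h5, h6⟩ := h
  simp only at h1 h2 h3 h4 h5 h6
  subst h1 h2
  set x := PySem.List.pyGetD a m 0 with hx
  by_cases hc : count.contains x = true
  · -- existing key
    simp only [stepA, stepB, ← hx, hc, Bool.true_eq_false, if_false]
    -- locate x's entry in count.items
    have hxk : x ∈ count.keys := (PySem.Dict.contains_iff_mem_keys count x).mp hc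
    have h4' := h4
    simp only [PySem.Dict.keys] at hxk h4'
    obtain ⟨p, hp, hx⟩ := List.mem_map.mp hxk
    obtain ⟨x, v⟩ := p
    simp only at hx
    subst hx
    obtain ⟨X, Y, hXY⟩ := List.append_of_mem hp
    have hv : count.getD x 0 = v := PySem.Dict.getD_of_mem_items count hp h4 0
    rw [hXY] at h4'
    simp only [List.map_append, List.map_cons] at h4'
    obtain ⟨n1, n2, ndisj⟩ := List.nodup_append.mp h4'
    have hnd : x ∉ X.map Prod.fst ∧ x ∉ Y.map Prod.fst :=
      ⟨fun hmem => (ndisj x (by simpa using hmem) x (by simp)) rfl, by simpa using (List.nodup_cons.mp n2).1⟩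
    have hitems : (count.insert x (count.getD x 0 + 1)).items
        = X ++ (x, count.getD x 0 + 1) :: Y := by
      rw [PySem.Dict.items_insert_of_contains count _ hc, hXY]
      simp only [List.map_append, List.map_cons, BEq.rfl]
      congr 1
      · refine List.map_congr_left ?_ |>.trans (List.map_id _)
        intro q hq
        have : q.1 ≠ x := fun h => hnd.1 (List.mem_map.mpr ⟨q, hq, h⟩)
        simp [this]
      · congr 1
        refine List.map_congr_left ?_ |>.trans (List.map_id _)
        intro q hq
        have : q.1 ≠ x := fun h => hnd.2 (List.mem_map.mpr ⟨q, hq, h⟩)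
        simp [this]
    have hmapX : ∀ (Z : List (Int × Int)), x ∉ Z.map Prod.fst →
        Z.map (pvSpan left (last.insert x m)) = Z.map (pvSpan left last) := by
      intro Z hZ
      refine List.map_congr_left ?_
      intro q hq
      have hq1 : q.1 ≠ x := fun h => hZ (List.mem_map.mpr ⟨q, hq, h⟩)
      simp [pvSpan, PySem.Dict.getD_insert_of_ne last _ _ hq1]
    have hQ : pvQ (((count.insert x (count.getD x 0 + 1)).items).map
          (pvSpan left (last.insert x m)))
        = pvUpd (pvQ (count.items.map (pvSpan left last)))
            (count.getD x 0 + 1, m - left.getD x 0 + 1) := by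
      rw [hitems]
      conv_rhs => rw [hXY]
      simp only [List.map_append, List.map_cons]
      rw [hmapX X hnd.1, hmapX Y hnd.2]
      have h1 : pvSpan left (last.insert x m) (x, count.getD x 0 + 1)
          = (count.getD x 0 + 1, m - left.getD x 0 + 1) := by
        simp [pvSpan, PySem.Dict.getD_insert_self]
      have h2 : pvSpan left last (x, v) = (count.getD x 0, (pvSpan left last (x, v)).2) := by
        simp [pvSpan, hv]
      rw [h1, h2, pvQ_replace]
    have hlf : left.getD x 0 < m := h6 x hc
    have hcnt : (count.insert x (count.getD x 0 + 1)).getD x 0 = count.getD x 0 + 1 :=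
      PySem.Dict.getD_insert_self count x _ 0
    refine ⟨?_, ?_, ?_, ?_, ?_, ?_⟩
    · split_ifs <;> rfl
    · split_ifs <;> rfl
    · rw [hQ, ← h3]
      simp only [hcnt]
      rw [← stepPair max1 min1 (count.getD x 0 + 1) (m - left.getD x 0 + 1)]
      split_ifs <;> rfl
    · exact PySem.Dict.nodup_keys_insert count x _ h4
    · simp only [hcnt]
      split_ifs <;> simp only [] <;> omega
    · intro y hy
      simp only [PySem.Dict.contains_insert] at hy
      rcases Bool.or_eq_true_iff.mp hy with h | h
      · have : y = x := by simpa using h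
        subst this
        show left.getD x 0 < m + 1
        omega
      · have := h6 y h
        show left.getD y 0 < m + 1
        omega
  · -- fresh key
    rw [Bool.not_eq_true] at hc
    simp only [stepA, stepB, ← hx, hc, ite_true]
    have hxk : x ∉ count.keys := fun h => by
      simp [(PySem.Dict.contains_iff_mem_keys count x).mpr h] at hc
    have hitems : (count.insert x 1).items = count.items ++ [(x, 1)] :=
      PySem.Dict.items_insert_of_not_contains count 1 hc
    have hmapX : count.items.map (pvSpan (left.insert x m) (last.insert x m))
        = count.items.map (pvSpan left last) := by
      refine List.map_congr_left ?_
      intro q hq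
      have hq1 : q.1 ≠ x := fun h => hxk (h ▸ PySem.Dict.mem_keys_of_mem_items count hq)
      simp [pvSpan, PySem.Dict.getD_insert_of_ne last _ _ hq1,
        PySem.Dict.getD_insert_of_ne left _ _ hq1]
    have hQ : pvQ (((count.insert x 1).items).map (pvSpan (left.insert x m) (last.insert x m)))
        = pvUpd (pvQ (count.items.map (pvSpan left last))) (1, m - m + 1) := by
      rw [hitems]
      simp only [List.map_append, List.map_cons, List.map_nil]
      rw [hmapX]
      have h1 : pvSpan (left.insert x m) (last.insert x m) (x, 1) = (1, m - m + 1) := by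
        simp [pvSpan, PySem.Dict.getD_insert_self]
      rw [h1]
      simp [pvQ, List.foldl_append]
    have hcnt : (count.insert x 1).getD x 0 = 1 := PySem.Dict.getD_insert_self count x 1 0
    have hlf : (left.insert x m).getD x 0 = m := PySem.Dict.getD_insert_self left x m 0
    refine ⟨?_, ?_, ?_, ?_, ?_, ?_⟩
    · split_ifs <;> rfl
    · split_ifs <;> rfl
    · rw [hQ, ← h3]
      simp only [hcnt, hlf]
      rw [← stepPair max1 min1 1 (m - m + 1)]
      split_ifs <;> rfl
    · exact PySem.Dict.nodup_keys_insert count x 1 h4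
    · simp only [hcnt, hlf]
      split_ifs <;> simp only [] <;> omega
    · intro y hy
      simp only [PySem.Dict.contains_insert] at hy
      rcases Bool.or_eq_true_iff.mp hy with h | h
      · have hyx : y = x := by simpa using h
        subst hyx
        rw [hlf]
        omega
      · have hne : y ≠ x := fun hh => by rw [hh, hc] at h; exact Bool.false_ne_true h
        rw [PySem.Dict.getD_insert_of_ne left m 0 hne]
        have := h6 y h
        omega

lemma pvRel_range (a : List Int) (m : Nat) :
    pvRel ((PySem.List.pyRange 0 (m : Int) 1).foldl (stepA a) (PySem.Dict.empty, PySem.Dict.empty, 0, 0, 0))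
          ((PySem.List.pyRange 0 (m : Int) 1).foldl (stepB a) (PySem.Dict.empty, PySem.Dict.empty, PySem.Dict.empty))
          (m : Int) := by
  induction m with
  | zero =>
    simp only [Nat.cast_zero, PySem.List.pyRange_one_eq_nil (by omega : (0:Int) ≤ 0), List.foldl_nil]
    refine ⟨rfl, rfl, rfl, PySem.Dict.nodup_keys_empty, le_refl 0, ?_⟩
    intro y hy
    simp [PySem.Dict.contains_empty] at hy
  | succ k ih =>
    have hsplit : PySem.List.pyRange 0 ((k + 1 : Nat) : Int) 1
        = PySem.List.pyRange 0 (k : Int) 1 ++ [(k : Int)] := by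
      push_cast
      exact PySem.List.pyRange_one_succ_right (by omega)
    rw [hsplit, List.foldl_append, List.foldl_append]
    simp only [List.foldl_cons, List.foldl_nil]
    have := pvRel_step a _ _ (k : Int) ih
    convert this using 2

lemma count_foldl (l : List Int) (c : Int) : l.foldl (fun ans _ => ans + 1) c = c + l.length := by
  induction l generalizing c with
  | nil => simp
  | cons y l ih => simp [ih]; omega

-- ===== VERDICT (by name: the statement is the Claim_ definition above) =====
theorem Max_occurence_spec : Claim_equal_Max_occurence := by
  intro a n _ _
  unfold Spec_Max_occurence Max_occurence Max_occurence_alt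
  by_cases hn : 0 ≤ n
  · have hrel := pvRel_range a n.toNat
    rw [Int.toNat_of_nonneg hn] at hrel
    set sA := (PySem.List.pyRange 0 n 1).foldl (stepA a) (PySem.Dict.empty, PySem.Dict.empty, 0, 0, 0) with hsA
    set sB := (PySem.List.pyRange 0 n 1).foldl (stepB a) (PySem.Dict.empty, PySem.Dict.empty, PySem.Dict.empty) with hsB
    obtain ⟨left, count, max1, min1, start⟩ := sA
    obtain ⟨countB, first, last⟩ := sB
    obtain ⟨e1, e2, e3, e4, e5, e6⟩ := hrel
    simp only at e1 e2 e3 e5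
    show (PySem.List.pyRange start (start + min1) 1).foldl (fun ans _ => ans + 1) 0
        = (countB.items.foldl (scanStep first last) (0, 0)).2
    have hB : countB.items.foldl (scanStep first last) (0, 0)
        = pvQ (countB.items.map (pvSpan first last)) := by
      rw [pvQ, List.foldl_map]
      rfl
    rw [hB, ← e3, count_foldl, PySem.List.length_pyRange_one]
    omega
  · rw [PySem.List.pyRange_one_eq_nil (by omega)]
    simp only [List.foldl_nil]
    rfl
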